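-- pv_equiv track=rewrite | github.com/CODE-U-S/Coding_Test_Study | 2st/Yeonwoo/커피 심부름.py | solution
-- ===== SOURCE A (Python) =====
-- def solution(order):
--     answer = 0
--     for i in order:
--         if i=="iceamericano" or i=="americanoice" or i=="hotamericano" or i=="americanohot" or i=="americano" or i=="anything":
--             answer += 4500
--         else:
--             answer += 5000
--     return answer
-- ===== SOURCE B (Python) =====
-- def solution(order):
--     freq = {}
--     for name in order:
--         freq[name] = freq.get(name, 0) + 1
--     total = 0
--     for name, cnt in freq.items():
--         if name in ("iceamericano", "americanoice", "hotamericano", "americanohot", "americano", "anything"):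
--             total += 4500 * cnt
--         else:
--             total += 5000 * cnt
--     return total
-- ===== Notes on version B (the rewrite author's own statement) =====
-- stated objective: alternative
-- what changed: Replaces the per-item branch-and-accumulate loop with a two-stage aggregation: build a name->count frequency dict in one pass, then sum price(name)*count over the distinct names.
import Mathlib
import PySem

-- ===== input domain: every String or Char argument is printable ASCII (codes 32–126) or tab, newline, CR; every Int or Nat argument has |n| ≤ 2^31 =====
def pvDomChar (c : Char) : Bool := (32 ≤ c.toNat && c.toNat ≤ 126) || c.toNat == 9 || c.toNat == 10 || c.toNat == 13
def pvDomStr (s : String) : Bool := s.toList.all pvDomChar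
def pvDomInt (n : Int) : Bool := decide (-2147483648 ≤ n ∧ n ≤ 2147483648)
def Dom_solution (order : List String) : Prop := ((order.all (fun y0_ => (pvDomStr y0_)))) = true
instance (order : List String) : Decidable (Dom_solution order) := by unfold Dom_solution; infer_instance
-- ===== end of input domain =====

-- B replaces A's per-item branch-and-accumulate loop with a two-stage aggregation (frequency dict, then price*count per distinct name); objective: alternative.

-- ===== PORT A =====
def solution (order : List String) : Int :=
  order.foldl (fun answer i =>
    if i = "iceamericano" ∨ i = "americanoice" ∨ i = "hotamericano" ∨ i = "americanohot" ∨ i = "americano" ∨ i = "anything" then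
      answer + 4500
    else
      answer + 5000) 0

-- ===== PORT B =====
def cheapTuple : List String :=
  ["iceamericano", "americanoice", "hotamericano", "americanohot", "americano", "anything"]

def solution_alt (order : List String) : Int :=
  (order.foldl (fun d name => d.insert name (d.getD name 0 + 1))
    (PySem.Dict.empty : PySem.Dict String Int)).items.foldl (fun total p =>
    if p.1 ∈ cheapTuple then total + 4500 * p.2 else total + 5000 * p.2) 0

-- ===== PRECONDITION & SPEC =====
def Spec_solution (order : List String) (out : Int) : Prop := out = solution_alt order
instance (order : List String) (out : Int) : Decidable (Spec_solution order out) := by unfold Spec_solution; infer_instance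

-- ===== CLAIM (what is proved, stated in full; the proofs are below) =====
def Claim_equal_solution : Prop := ∀ (order : List String), Dom_solution order → Spec_solution order (solution order)

-- ===== LEMMAS AND PROOFS =====

-- the per-name price, shared by both rewriting steps
def priceOf (x : String) : Int := if x ∈ cheapTuple then 4500 else 5000

lemma solution_eq_sum (order : List String) : solution order = (order.map priceOf).sum := by
  unfold solution
  have hcongr : ∀ (acc : Int) (x : String), x ∈ order →
      (if x = "iceamericano" ∨ x = "americanoice" ∨ x = "hotamericano" ∨ x = "americanohot" ∨ x = "americano" ∨ x = "anything" then
        acc + 4500 else acc + 5000) = acc + priceOf x := by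
    intro acc x _
    unfold priceOf cheapTuple
    by_cases h : x = "iceamericano" ∨ x = "americanoice" ∨ x = "hotamericano" ∨ x = "americanohot" ∨ x = "americano" ∨ x = "anything"
    · rw [if_pos h, if_pos (by simpa using h)]
    · rw [if_neg h, if_neg (by simpa using h)]
  rw [PySem.List.foldl_congr_mem order
        (fun answer i =>
          if i = "iceamericano" ∨ i = "americanoice" ∨ i = "hotamericano" ∨ i = "americanohot" ∨ i = "americano" ∨ i = "anything" then
            answer + 4500 else answer + 5000)
        (fun acc x => acc + priceOf x) 0 hcongr,
      PySem.List.foldl_add]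
  ring

lemma alt_eq_sum (order : List String) :
    solution_alt order = ((PySem.Set.ofList order).map (fun k => priceOf k * (order.count k : Int))).sum := by
  unfold solution_alt
  rw [show order.foldl (fun d name => d.insert name (d.getD name 0 + 1))
        (PySem.Dict.empty : PySem.Dict String Int)
        = PySem.Dict.counter order from PySem.Dict.foldl_insert_getD_add_one_eq_counter order]
  have hcongr : ∀ (acc : Int) (p : String × Int), p ∈ (PySem.Dict.counter order).items →
      (if p.1 ∈ cheapTuple then acc + 4500 * p.2 else acc + 5000 * p.2)
        = acc + (if p.1 ∈ cheapTuple then 4500 * p.2 else 5000 * p.2) := by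
    intro acc p _; split_ifs <;> rfl
  rw [PySem.List.foldl_congr_mem (PySem.Dict.counter order).items
        (fun total p => if p.1 ∈ cheapTuple then total + 4500 * p.2 else total + 5000 * p.2)
        (fun acc p => acc + (if p.1 ∈ cheapTuple then 4500 * p.2 else 5000 * p.2)) 0 hcongr,
      PySem.List.foldl_add, PySem.Dict.items_counter, List.map_map]
  have : ((fun p : String × Int => if p.1 ∈ cheapTuple then 4500 * p.2 else 5000 * p.2) ∘
          fun k => (k, (order.count k : Int))) = fun k => priceOf k * (order.count k : Int) := by
    funext k
    simp only [Function.comp, priceOf]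
    split_ifs <;> rfl
  rw [this]
  ring

lemma toFinset_ofList (order : List String) : (PySem.Set.ofList order).toFinset = order.toFinset := by
  ext x
  simp [List.mem_toFinset, PySem.Set.mem_ofList]

lemma solution_eq_alt (order : List String) : solution order = solution_alt order := by
  rw [solution_eq_sum, alt_eq_sum,
      ← List.sum_toFinset _ (PySem.Set.nodup_ofList order), toFinset_ofList,
      Finset.sum_list_map_count order priceOf]
  refine Finset.sum_congr rfl (fun m _ => ?_)
  rw [nsmul_eq_mul, mul_comm]

-- ===== VERDICT (by name: the statement is the Claim_ definition above) =====
theorem solution_spec : Claim_equal_solution := by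
  intro order _
  unfold Spec_solution
  exact solution_eq_alt order
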